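-- pv_equiv track=rewrite | github.com/Tbread/AlgorithmPrac | 프로그래머스/CodingTest_prac/68644.py | solution
-- ===== SOURCE A (Python) =====
-- from itertools import combinations
-- import heapq
--
-- def solution(numbers):
--     comb = list(combinations(numbers,2))
--     temp = []
--     answer = []
--     for i in comb:
--         temp.append(sum(i))
--     temp = list(set(temp))
--     heapq.heapify(temp)
--     for i in range(len(temp)):
--         answer.append(heapq.heappop(temp))
--     return answer
-- ===== SOURCE B (Python) =====
-- def _insert_unique(lst, s):
--     prefix = []
--     rest = lst
--     while rest and rest[0] < s:
--         prefix.append(rest[0])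
--         rest = rest[1:]
--     if rest and rest[0] == s:
--         return lst
--     return prefix + [s] + rest
--
-- def solution(numbers):
--     answer = []
--     rest = numbers
--     while rest:
--         x, rest = rest[0], rest[1:]
--         for y in rest:
--             answer = _insert_unique(answer, x + y)
--     return answer
-- ===== Notes on version B (the rewrite author's own statement) =====
-- stated objective: alternative
-- what changed: B never builds a set, a heap or calls a sort: it keeps one sorted duplicate-free accumulator and splices each pairwise sum into place (online ordered insertion with dedup) as the pairs are generated, replacing A's collect-all/set-dedup/heapify/heappop-drain pipeline.
import Mathlib
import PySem

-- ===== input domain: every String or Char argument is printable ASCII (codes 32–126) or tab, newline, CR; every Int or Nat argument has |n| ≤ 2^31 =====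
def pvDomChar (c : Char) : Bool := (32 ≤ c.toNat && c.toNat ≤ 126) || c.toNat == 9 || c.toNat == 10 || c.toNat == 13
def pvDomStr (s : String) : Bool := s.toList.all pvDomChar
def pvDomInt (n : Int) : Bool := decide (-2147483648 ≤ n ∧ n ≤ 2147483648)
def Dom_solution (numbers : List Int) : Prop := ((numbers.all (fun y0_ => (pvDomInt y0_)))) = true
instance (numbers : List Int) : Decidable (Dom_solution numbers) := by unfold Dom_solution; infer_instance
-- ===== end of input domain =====

-- B drops A's set and heap entirely: it keeps one sorted duplicate-free accumulator and inserts
-- each pairwise sum into place as it is produced (online ordered insertion with dedup); same outputs.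

-- ===== PORT A =====
-- itertools.combinations(l, 2): all pairs (l[i], l[j]) with i < j, in order
def comb2 (l : List Int) : List (Int × Int) :=
  match l with
  | [] => []
  | x :: xs => xs.map (fun y => (x, y)) ++ comb2 xs

-- index of the smallest of a[pos] and its (in-range) children; ties keep the earlier of pos/left
def pick (a : List Int) (pos : Nat) : Nat :=
  if 2*pos+1 < a.length ∧ a.getD (2*pos+1) 0 < a.getD pos 0 then
    if 2*pos+2 < a.length ∧ a.getD (2*pos+2) 0 < a.getD (2*pos+1) 0 then 2*pos+2 else 2*pos+1
  else
    if 2*pos+2 < a.length ∧ a.getD (2*pos+2) 0 < a.getD pos 0 then 2*pos+2 else pos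

theorem pick_lt {a : List Int} {pos : Nat} (h : pick a pos ≠ pos) :
    pos < pick a pos ∧ pick a pos < a.length := by
  unfold pick at h ⊢
  split_ifs at h ⊢ with h1 h2 <;> omega

-- CPython heapq._siftup(heap, pos) ported as the textbook one-phase sift-down; exact here:
-- the heap's elements are distinct (list(set(...))), and on distinct elements CPython's
-- two-phase sink-to-leaf-then-bubble-up produces the identical array at every step.
def siftdown (a : List Int) (pos : Nat) : List Int :=
  if h : pick a pos = pos then a
  else
    siftdown ((a.set pos (a.getD (pick a pos) 0)).set (pick a pos) (a.getD pos 0)) (pick a pos)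
termination_by a.length - pos
decreasing_by
  simp only [List.length_set]
  have := pick_lt h
  omega

theorem siftdown_length (a : List Int) (pos : Nat) : (siftdown a pos).length = a.length := by
  fun_induction siftdown a pos with
  | case1 => rfl
  | case2 a pos h ih => simpa using ih

-- heapq.heapify: for i in reversed(range(n//2)): _siftup(heap, i)
def heapify (a : List Int) : List Int :=
  ((List.range (a.length / 2)).reverse).foldl (fun h i => siftdown h i) a

-- heapq.heappop: lastelt = heap.pop(); if heap: r = heap[0]; heap[0] = lastelt; _siftup(heap,0); return r
-- returns (popped value, remaining heap); (0, []) on [] is unreachable (Python raises IndexError;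
-- the drain loop below pops exactly len(temp) times, never from an empty heap)
def heappop (a : List Int) : Int × List Int :=
  match a with
  | [] => (0, [])
  | _ :: _ =>
    let last := a.getD (a.length - 1) 0
    let rest := a.dropLast
    if rest.isEmpty then (last, [])
    else (rest.getD 0 0, siftdown (rest.set 0 last) 0)

theorem heappop_length_lt {a : List Int} (h : a ≠ []) : (heappop a).2.length < a.length := by
  match a with
  | [] => exact absurd rfl h
  | x :: xs =>
    simp only [heappop]
    split
    · simpa using Nat.succ_pos _
    · simp [siftdown_length, List.length_dropLast]

-- the for-loop 'for i in range(len(temp)): answer.append(heappop(temp))': each pop shrinks the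
-- heap by one, so the loop pops until the heap is empty
def drain (a : List Int) : List Int :=
  if h : a = [] then []
  else (heappop a).1 :: drain (heappop a).2
termination_by a.length
decreasing_by exact heappop_length_lt h

def solution (numbers : List Int) : List Int :=
  let comb := comb2 numbers
  let temp := comb.foldl (fun acc i => acc ++ [i.1 + i.2]) ([] : List Int)
  -- list(set(temp)): distinct sums; Python's hash iteration order is not modelled, but the final
  -- drained output is proved below to be order-independent (it is the sorted list of the elements)
  let temp := PySem.Set.ofList temp
  drain (heapify temp)

-- ===== PORT B =====
-- _insert_unique's while loop: walk rest forward, moving elements < s into prefix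
def splitLt (pre : List Int) (rest : List Int) (s : Int) : List Int × List Int :=
  match rest with
  | [] => (pre, [])
  | x :: xs => if x < s then splitLt (pre ++ [x]) xs s else (pre, x :: xs)

-- _insert_unique(lst, s): insert s into the sorted list lst unless already present
def insertUnique (lst : List Int) (s : Int) : List Int :=
  match splitLt [] lst s with
  | (pre, rest) =>
    match rest with
    | x :: _ => if x = s then lst else pre ++ s :: rest
    | [] => pre ++ s :: rest

-- the outer while loop: pop the head x, insert x+y for each later y, recurse on the tail
def goB (rest : List Int) (answer : List Int) : List Int :=
  match rest with
  | [] => answer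
  | x :: xs => goB xs (xs.foldl (fun a y => insertUnique a (x + y)) answer)

def solution_alt (numbers : List Int) : List Int := goB numbers []

-- ===== PRECONDITION & SPEC =====
def Spec_solution (numbers : List Int) (out : List Int) : Prop := out = solution_alt numbers
instance (numbers : List Int) (out : List Int) : Decidable (Spec_solution numbers out) := by unfold Spec_solution; infer_instance

-- ===== CLAIM (what is proved, stated in full; the proofs are below) =====
def Claim_equal_solution : Prop := ∀ (numbers : List Int), Dom_solution numbers → Spec_solution numbers (solution numbers)

-- ===== LEMMAS AND PROOFS =====

-- descendants in the implicit binary heap: j lies in the subtree rooted at p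
inductive Desc : Nat → Nat → Prop
  | refl (p : Nat) : Desc p p
  | left {p j : Nat} : Desc p j → Desc p (2*j+1)
  | right {p j : Nat} : Desc p j → Desc p (2*j+2)

theorem Desc.le {p j : Nat} (h : Desc p j) : p ≤ j := by
  induction h <;> omega

theorem Desc.trans {p q j : Nat} (h1 : Desc p q) (h2 : Desc q j) : Desc p j := by
  induction h2 with
  | refl => exact h1
  | left _ ih => exact Desc.left ih
  | right _ ih => exact Desc.right ih

theorem Desc.eq_or_ge {p j : Nat} (h : Desc p j) : j = p ∨ 2*p+1 ≤ j := by
  induction h with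
  | refl => left; rfl
  | left h ih => have := h.le; omega
  | right h ih => have := h.le; omega

theorem not_desc_of_lt {p j : Nat} (h : j < p) : ¬ Desc p j := fun hd => absurd hd.le (by omega)

def heapAt (a : List Int) (i : Nat) : Prop :=
  (2*i+1 < a.length → a.getD i 0 ≤ a.getD (2*i+1) 0) ∧
  (2*i+2 < a.length → a.getD i 0 ≤ a.getD (2*i+2) 0)

def Hfrom (a : List Int) (k : Nat) : Prop := ∀ i, k ≤ i → heapAt a i

theorem getD_set_ne {a : List Int} {i j : Nat} {v : Int} (h : i ≠ j) :
    (a.set i v).getD j 0 = a.getD j 0 := by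
  simp [List.getD, List.getElem?_set_ne h]

theorem getD_set_self {a : List Int} {i : Nat} {v : Int} (h : i < a.length) :
    (a.set i v).getD i 0 = v := by
  simp [List.getD, List.getElem?_set_self, h]

theorem pick_desc (a : List Int) (pos : Nat) : Desc pos (pick a pos) := by
  unfold pick
  split_ifs <;> first | exact Desc.right (Desc.refl pos) | exact Desc.left (Desc.refl pos) | exact Desc.refl pos

-- when pick stops, pos already satisfies the heap condition
theorem pick_eq_spec {a : List Int} {pos : Nat} (h : pick a pos = pos) : heapAt a pos := by
  unfold pick at h
  unfold heapAt
  split_ifs at h with h1 h2 h3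
  · omega
  · omega
  · omega
  · refine ⟨fun hc => ?_, fun hc => ?_⟩
    · rcases lt_or_ge (a.getD (2*pos+1) 0) (a.getD pos 0) with hl | hl
      · exact absurd ⟨hc, hl⟩ h1
      · exact hl
    · rcases lt_or_ge (a.getD (2*pos+2) 0) (a.getD pos 0) with hl | hl
      · exact absurd ⟨hc, hl⟩ h3
      · exact hl

-- when pick moves: the picked child is strictly smaller than pos and ≤ the other child
theorem pick_ne_spec {a : List Int} {pos : Nat} (h : pick a pos ≠ pos) :
    a.getD (pick a pos) 0 < a.getD pos 0 ∧
    (pick a pos = 2*pos+1 ∨ pick a pos = 2*pos+2) ∧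
    (∀ c, (c = 2*pos+1 ∨ c = 2*pos+2) → c < a.length → c ≠ pick a pos →
      a.getD (pick a pos) 0 ≤ a.getD c 0) := by
  unfold pick at h ⊢
  split_ifs at h ⊢ with h1 h2 h3
  · refine ⟨lt_trans h2.2 h1.2, Or.inr rfl, ?_⟩
    rintro c (rfl | rfl) hc hne
    · exact le_of_lt h2.2
    · omega
  · refine ⟨h1.2, Or.inl rfl, ?_⟩
    rintro c (rfl | rfl) hc hne
    · omega
    · rcases lt_or_ge (a.getD (2*pos+2) 0) (a.getD (2*pos+1) 0) with hl | hl
      · exact absurd ⟨hc, hl⟩ h2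
      · exact hl
  · refine ⟨h3.2, Or.inr rfl, ?_⟩
    rintro c (rfl | rfl) hc hne
    · rcases lt_or_ge (a.getD (2*pos+1) 0) (a.getD pos 0) with hl | hl
      · exact absurd ⟨hc, hl⟩ h1
      · exact le_trans (le_of_lt h3.2) hl
    · omega
  · omega

theorem siftdown_getD_of_not_desc {a : List Int} {pos j : Nat} (h : ¬ Desc pos j) :
    (siftdown a pos).getD j 0 = a.getD j 0 := by
  fun_induction siftdown a pos with
  | case1 => rfl
  | case2 a pos hp ih =>
    have hpd : Desc pos (pick a pos) := pick_desc a pos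
    have hnd : ¬ Desc (pick a pos) j := fun hd => h (hpd.trans hd)
    rw [ih hnd, getD_set_ne, getD_set_ne]
    · exact fun he => h (he ▸ Desc.refl pos)
    · exact fun he => h (he ▸ hpd)

theorem swap_perm (a : List Int) {i j : Nat} (hi : i < a.length) (hj : j < a.length) :
    ((a.set i (a.getD j 0)).set j (a.getD i 0)).Perm a := by
  rw [List.perm_iff_count]
  intro b
  rw [List.count_set (by simpa using hj), List.count_set hi]
  have hgi : a.getD i 0 = a[i] := List.getD_eq_getElem a 0 hi
  have hgj : a.getD j 0 = a[j] := List.getD_eq_getElem a 0 hj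
  have hset : (a.set i (a.getD j 0))[j]'(by simpa using hj) = a[j] := by
    rw [List.getElem_set]; split <;> simp_all
  rw [hset, hgi, hgj]
  have hci : a[i] = b → 0 < List.count b a := fun h => List.count_pos_iff.mpr (h ▸ List.getElem_mem hi)
  have hcj : a[j] = b → 0 < List.count b a := fun h => List.count_pos_iff.mpr (h ▸ List.getElem_mem hj)
  by_cases h1 : a[i] = b <;> by_cases h2 : a[j] = b <;> simp [h1, h2] <;> omega

theorem siftdown_perm (a : List Int) (pos : Nat) : (siftdown a pos).Perm a := by
  fun_induction siftdown a pos with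
  | case1 a pos h => exact List.Perm.refl a
  | case2 a pos h ih =>
    have hb := pick_lt h
    exact ih.trans (swap_perm a (by omega) hb.2)

theorem root_le_desc {a : List Int} {k : Nat} (h : Hfrom a k) :
    ∀ p, k ≤ p → ∀ j, Desc p j → j < a.length → a.getD p 0 ≤ a.getD j 0 := by
  intro p hp j hd
  induction hd with
  | refl => intro _; exact le_refl _
  | @left q hq ih =>
    intro hj
    have hqn : q < a.length := by omega
    exact le_trans (ih hqn) ((h q (le_trans hp hq.le)).1 hj)
  | @right q hq ih =>
    intro hj
    have hqn : q < a.length := by omega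
    exact le_trans (ih hqn) ((h q (le_trans hp hq.le)).2 hj)

theorem siftdown_lb {a : List Int} {pos : Nat} {x : Int} :
    (∀ j, Desc pos j → j < a.length → x ≤ a.getD j 0) →
    ∀ j, Desc pos j → j < a.length → x ≤ (siftdown a pos).getD j 0 := by
  fun_induction siftdown a pos with
  | case1 a pos h => exact fun hb => hb
  | case2 a pos h ih =>
    intro hb
    have hps := pick_lt h
    have hdesc_s : Desc pos (pick a pos) := pick_desc a pos
    have hb' : ∀ j, Desc (pick a pos) j →
        j < ((a.set pos (a.getD (pick a pos) 0)).set (pick a pos) (a.getD pos 0)).length →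
        x ≤ ((a.set pos (a.getD (pick a pos) 0)).set (pick a pos) (a.getD pos 0)).getD j 0 := by
      intro j hdj hjl
      simp only [List.length_set] at hjl
      by_cases hjs : j = pick a pos
      · subst hjs
        rw [getD_set_self (by simpa using hps.2)]
        exact hb pos (Desc.refl pos) (by omega)
      · have hjp : j ≠ pos := by have := hdj.le; omega
        rw [getD_set_ne (fun he => hjs he.symm), getD_set_ne (fun he => hjp he.symm)]
        exact hb j (hdesc_s.trans hdj) hjl
    intro j hdj hjl
    by_cases hds : Desc (pick a pos) j
    · exact ih hb' j hds (by simpa using hjl)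
    · rw [siftdown_getD_of_not_desc hds]
      by_cases hjp : j = pos
      · rw [hjp, getD_set_ne (show pick a pos ≠ pos from h), getD_set_self (by omega)]
        exact hb _ hdesc_s hps.2
      · have hjs : j ≠ pick a pos := fun he => hds (he ▸ Desc.refl _)
        rw [getD_set_ne (fun he => hjs he.symm), getD_set_ne (fun he => hjp he.symm)]
        exact hb j hdj hjl

theorem siftdown_heap {a : List Int} {pos : Nat} :
    Hfrom a (pos+1) → Hfrom (siftdown a pos) pos := by
  fun_induction siftdown a pos with
  | case1 a pos hstop =>
    intro h i hi
    rcases Nat.eq_or_lt_of_le hi with he | hlt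
    · exact he ▸ pick_eq_spec hstop
    · exact h i hlt
  | case2 a pos hne ih =>
    intro h
    have hps := pick_lt hne
    have hspec := pick_ne_spec hne
    have hdesc_s : Desc pos (pick a pos) := pick_desc a pos
    have hsnp : pick a pos ≠ pos := hne
    -- the swapped array
    have hlen : ((a.set pos (a.getD (pick a pos) 0)).set (pick a pos) (a.getD pos 0)).length
        = a.length := by simp
    have ha'_pos : ((a.set pos (a.getD (pick a pos) 0)).set (pick a pos) (a.getD pos 0)).getD pos 0
        = a.getD (pick a pos) 0 := by
      rw [getD_set_ne hsnp, getD_set_self (by omega)]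
    have ha'_other : ∀ j, j ≠ pos → j ≠ pick a pos →
        ((a.set pos (a.getD (pick a pos) 0)).set (pick a pos) (a.getD pos 0)).getD j 0
        = a.getD j 0 := by
      intro j hjp hjs
      rw [getD_set_ne (fun he => hjs he.symm), getD_set_ne (fun he => hjp he.symm)]
    -- heap property below the picked child in the swapped array
    have h' : Hfrom ((a.set pos (a.getD (pick a pos) 0)).set (pick a pos) (a.getD pos 0))
        (pick a pos + 1) := by
      intro i hi
      have hip : i ≠ pos := by omega
      have his : i ≠ pick a pos := by omega
      constructor <;> intro hc <;> rw [hlen] at hc <;>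
        rw [ha'_other i hip his, ha'_other _ (by omega) (by omega)]
      · exact (h i (by omega)).1 hc
      · exact (h i (by omega)).2 hc
    have hres := ih h'
    -- lower bound: a[s] stays below everything in s's subtree after the recursive sift
    have hkey : ∀ c, Desc (pick a pos) c → c < a.length →
        a.getD (pick a pos) 0
          ≤ (siftdown ((a.set pos (a.getD (pick a pos) 0)).set (pick a pos) (a.getD pos 0))
              (pick a pos)).getD c 0 := by
      intro c hdc hcl
      refine siftdown_lb ?_ c hdc (by omega)
      intro j hdj hjl
      rw [hlen] at hjl
      by_cases hjs : j = pick a pos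
      · subst hjs
        rw [getD_set_self (by simp; omega)]
        exact le_of_lt hspec.1
      · have hjp : j ≠ pos := by have := hdj.le; omega
        rw [ha'_other j hjp hjs]
        exact root_le_desc h (pick a pos) (by omega) j hdj hjl
    intro i hi
    by_cases his : pick a pos ≤ i
    · exact hres i his
    · have hresl : (siftdown ((a.set pos (a.getD (pick a pos) 0)).set (pick a pos) (a.getD pos 0))
          (pick a pos)).length = a.length := by rw [siftdown_length, hlen]
      -- positions strictly between pos and s, and pos itself; children of such i are untouched
      have hchild_other : ∀ c, (c = 2*i+1 ∨ c = 2*i+2) → c ≠ pick a pos →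
          ¬ Desc (pick a pos) c := by
        intro c hc hcs hd
        rcases hd.eq_or_ge with he | hge
        · exact hcs he
        · rcases hspec.2.1 with hs | hs <;> omega
      by_cases hip : i = pos
      · subst hip
        have hroot : (siftdown ((a.set i (a.getD (pick a i) 0)).set (pick a i) (a.getD i 0))
            (pick a i)).getD i 0 = a.getD (pick a i) 0 := by
          rw [siftdown_getD_of_not_desc (not_desc_of_lt hps.1), ha'_pos]
        constructor <;> intro hc <;> rw [hresl] at hc <;> rw [hroot]
        · by_cases hcs : 2*i+1 = pick a i
          · rw [hcs]; exact hkey _ (Desc.refl _) hps.2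
          · rw [siftdown_getD_of_not_desc (hchild_other _ (Or.inl rfl) hcs),
              ha'_other _ (by omega) hcs]
            exact hspec.2.2 _ (Or.inl rfl) hc hcs
        · by_cases hcs : 2*i+2 = pick a i
          · rw [hcs]; exact hkey _ (Desc.refl _) hps.2
          · rw [siftdown_getD_of_not_desc (hchild_other _ (Or.inr rfl) hcs),
              ha'_other _ (by omega) hcs]
            exact hspec.2.2 _ (Or.inr rfl) hc hcs
      · -- pos < i < pick a pos: node and children untouched
        have hii : ¬ Desc (pick a pos) i := not_desc_of_lt (by omega)
        have hc1 : ∀ c, (c = 2*i+1 ∨ c = 2*i+2) → c ≠ pick a pos := by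
          intro c hc hcs
          rcases hspec.2.1 with hs | hs <;> omega
        constructor <;> intro hcl <;> rw [hresl] at hcl <;>
          rw [siftdown_getD_of_not_desc hii, ha'_other i hip (by omega),
            siftdown_getD_of_not_desc (hchild_other _ (by tauto) (hc1 _ (by tauto))),
            ha'_other _ (by omega) (hc1 _ (by tauto))]
        · exact (h i (by omega)).1 hcl
        · exact (h i (by omega)).2 hcl

theorem heapify_perm (a : List Int) : (heapify a).Perm a := by
  unfold heapify
  generalize (List.range (a.length / 2)).reverse = l
  induction l generalizing a with
  | nil => exact List.Perm.refl a
  | cons x xs ih => exact (ih (siftdown a x)).trans (siftdown_perm a x)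

theorem fold_heap : ∀ (k : Nat) (a : List Int), Hfrom a k →
    Hfrom (((List.range k).reverse).foldl (fun h i => siftdown h i) a) 0 := by
  intro k
  induction k with
  | zero => intro a h; simpa using h
  | succ k ih =>
    intro a h
    rw [List.range_succ, List.reverse_append]
    exact ih (siftdown a k) (siftdown_heap h)

theorem heapify_heap (a : List Int) : Hfrom (heapify a) 0 := by
  unfold heapify
  refine fold_heap _ a ?_
  intro i hi
  constructor <;> intro hc <;> exact absurd hc (by omega)

theorem heap_head_le {a : List Int} (h : Hfrom a 0) :
    ∀ j, j < a.length → a.getD 0 0 ≤ a.getD j 0 := by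
  intro j
  induction j using Nat.strong_induction_on with
  | _ j ih =>
    intro hj
    rcases Nat.eq_zero_or_pos j with rfl | hpos
    · exact le_refl _
    · have hsplit : j = 2*((j-1)/2)+1 ∨ j = 2*((j-1)/2)+2 := by omega
      have hplt : (j-1)/2 < j := by omega
      have hple := ih _ hplt (by omega)
      rcases hsplit with he | he
      · rw [he]
        exact le_trans hple ((h ((j-1)/2) (Nat.zero_le _)).1 (by omega))
      · rw [he]
        exact le_trans hple ((h ((j-1)/2) (Nat.zero_le _)).2 (by omega))

theorem heappop_spec {a : List Int} (hne : a ≠ []) (hh : Hfrom a 0) :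
    (heappop a).1 = a.getD 0 0 ∧ ((heappop a).1 :: (heappop a).2).Perm a ∧
    Hfrom (heappop a).2 0 := by
  match a with
  | [] => exact absurd rfl hne
  | [x] =>
    refine ⟨rfl, by simp [heappop], ?_⟩
    intro i hi
    constructor <;> intro hc <;> simp [heappop] at hc
  | x :: y :: t =>
    have hl0 : (y :: t) ≠ [] := by simp
    have hrest : (x :: y :: t).dropLast = x :: (y :: t).dropLast := by simp
    have hlast : (x :: y :: t).getD ((x :: y :: t).length - 1) 0 = (y :: t).getLast hl0 := by
      rw [List.getD_eq_getElem _ _ (by simp)]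
      rw [List.getLast_eq_getElem]
      simp
    have hpop : heappop (x :: y :: t)
        = (x, siftdown ((y :: t).getLast hl0 :: (y :: t).dropLast) 0) := by
      simp only [heappop, hrest, hlast]
      split
      · simp_all
      · rfl
    rw [hpop]
    have hperm0 : ((y :: t).getLast hl0 :: (y :: t).dropLast).Perm (y :: t) := by
      refine List.Perm.trans (List.perm_append_singleton _ _).symm ?_
      rw [List.dropLast_append_getLast hl0]
    refine ⟨rfl, ?_, ?_⟩
    · exact List.Perm.cons x (((siftdown_perm _ 0).trans hperm0))
    · -- the re-rooted shortened list is a heap below the root; sift it down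
      have hlen1 : ((y :: t).getLast hl0 :: (y :: t).dropLast).length = (y :: t).length := by
        simp [List.length_dropLast]
      have hval : ∀ m, 1 ≤ m → m < ((y :: t).getLast hl0 :: (y :: t).dropLast).length →
          ((y :: t).getLast hl0 :: (y :: t).dropLast).getD m 0 = (x :: y :: t).getD m 0 := by
        intro m hm1 hml
        match m, hm1 with
        | m+1, _ =>
          simp only [List.length_cons] at hml
          have hml' : m < (y :: t).dropLast.length := by omega
          rw [List.getD_cons_succ, List.getD_eq_getElem _ _ hml', List.getElem_dropLast,
            List.getD_cons_succ, List.getD_eq_getElem _ _ (by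
              simp only [List.length_dropLast, List.length_cons] at hml' ⊢; omega)]
      have h1 : Hfrom ((y :: t).getLast hl0 :: (y :: t).dropLast) 1 := by
        intro i hi
        have hil : (x :: y :: t).length = ((y :: t).getLast hl0 :: (y :: t).dropLast).length + 1 := by
          simp [List.length_dropLast]
        constructor <;> intro hc <;>
          rw [hval i hi (by omega), hval _ (by omega) hc]
        · exact (hh i (by omega)).1 (by omega)
        · exact (hh i (by omega)).2 (by omega)
      exact siftdown_heap h1

theorem drain_spec_aux : ∀ (n : Nat) (a : List Int), a.length ≤ n → Hfrom a 0 →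
    (drain a).Perm a ∧ (drain a).Pairwise (· ≤ ·) := by
  intro n
  induction n with
  | zero =>
    intro a hlen _
    have : a = [] := by cases a <;> simp_all
    subst this
    rw [drain]
    simp
  | succ n ih =>
    intro a hlen hh
    by_cases hae : a = []
    · subst hae; rw [drain]; simp
    · rw [drain, dif_neg hae]
      obtain ⟨h1, h2, h3⟩ := heappop_spec hae hh
      have hlt := heappop_length_lt hae
      obtain ⟨ihp, ihs⟩ := ih (heappop a).2 (by omega) h3
      constructor
      · exact (List.Perm.cons _ ihp).trans h2
      · refine List.Pairwise.cons ?_ ihs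
        intro z hz
        have hz' : z ∈ (heappop a).2 := ihp.mem_iff.mp hz
        have hz2 : z ∈ a := h2.mem_iff.mp (List.mem_cons_of_mem _ hz')
        obtain ⟨m, hm, he⟩ := List.mem_iff_getElem.mp hz2
        rw [h1]
        calc a.getD 0 0 ≤ a.getD m 0 := heap_head_le hh m hm
          _ = z := by rw [List.getD_eq_getElem _ _ hm]; exact he

theorem drain_spec {a : List Int} (hh : Hfrom a 0) :
    (drain a).Perm a ∧ (drain a).Pairwise (· ≤ ·) :=
  drain_spec_aux a.length a (le_refl _) hh

theorem drain_heapify_eq_sorted (xs : List Int) (hnd : xs.Nodup) :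
    PySem.List.sorted xs (fun x => x) false = drain (heapify xs) := by
  have hh := heapify_heap xs
  have hperm : (drain (heapify xs)).Perm xs := (drain_spec hh).1.trans (heapify_perm xs)
  have hle : (drain (heapify xs)).Pairwise (· ≤ ·) := (drain_spec hh).2
  have hnd2 : (drain (heapify xs)).Nodup := hperm.nodup_iff.mpr hnd
  have hlt : (drain (heapify xs)).Pairwise (· < ·) :=
    (hle.and hnd2).imp (fun h => lt_of_le_of_ne h.1 h.2)
  exact PySem.List.sorted_eq_of_perm_of_pairwise_lt _ _ _ hperm hlt

-- ===== B-side lemmas =====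

-- the plain head-recursive form of _insert_unique, used only inside the proofs
def insRec (lst : List Int) (s : Int) : List Int :=
  match lst with
  | [] => [s]
  | x :: xs => if s < x then s :: x :: xs else if s = x then x :: xs else x :: insRec xs s

theorem splitLt_insRec (s : Int) : ∀ (rest pre : List Int),
    (match splitLt pre rest s with
     | (p, r) =>
       match r with
       | x :: _ => if x = s then pre ++ rest else p ++ s :: r
       | [] => p ++ s :: r) = pre ++ insRec rest s := by
  intro rest
  induction rest with
  | nil => intro pre; simp [splitLt, insRec]
  | cons x xs ih =>
    intro pre
    by_cases hx : x < s
    · have h1 : ¬ s < x := by omega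
      have h2 : ¬ s = x := by omega
      simpa [splitLt, hx, insRec, h1, h2] using ih (pre ++ [x])
    · by_cases he : x = s
      · simp [splitLt, hx, insRec, he.symm]
      · have hs : s < x := by omega
        simp [splitLt, hx, insRec, hs, he]

theorem insertUnique_eq (lst : List Int) (s : Int) : insertUnique lst s = insRec lst s := by
  have := splitLt_insRec s lst []
  simpa [insertUnique] using this

theorem mem_insRec (lst : List Int) (s a : Int) :
    a ∈ insRec lst s ↔ a = s ∨ a ∈ lst := by
  induction lst with
  | nil => simp [insRec]
  | cons x xs ih =>
    simp only [insRec]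
    split_ifs with h1 h2
    · simp
    · subst h2; simp
    · simp [ih]; tauto

theorem pairwise_insRec {lst : List Int} (s : Int) (h : lst.Pairwise (· < ·)) :
    (insRec lst s).Pairwise (· < ·) := by
  induction lst with
  | nil => simp [insRec]
  | cons x xs ih =>
    rcases List.pairwise_cons.mp h with ⟨hx, hxs⟩
    simp only [insRec]
    split_ifs with h1 h2
    · exact List.pairwise_cons.mpr ⟨by
        intro b hb
        rcases List.mem_cons.mp hb with rfl | hb
        · exact h1
        · exact lt_trans h1 (hx b hb), h⟩
    · exact h
    · have hxlt : x < s := by omega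
      refine List.pairwise_cons.mpr ⟨?_, ih hxs⟩
      intro b hb
      rcases (mem_insRec xs s b).mp hb with rfl | hb
      · exact hxlt
      · exact hx b hb

theorem foldl_ins_pairwise (x : Int) : ∀ (ys acc : List Int), acc.Pairwise (· < ·) →
    (ys.foldl (fun a y => insertUnique a (x + y)) acc).Pairwise (· < ·) := by
  intro ys
  induction ys with
  | nil => intro acc h; simpa
  | cons y ys ih =>
    intro acc h
    simp only [List.foldl_cons]
    exact ih _ (insertUnique_eq acc (x + y) ▸ pairwise_insRec _ h)

theorem mem_foldl_ins (x a : Int) : ∀ (ys acc : List Int),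
    (a ∈ ys.foldl (fun a y => insertUnique a (x + y)) acc ↔ a ∈ acc ∨ ∃ y ∈ ys, a = x + y) := by
  intro ys
  induction ys with
  | nil => intro acc; simp
  | cons y ys ih =>
    intro acc
    rw [List.foldl_cons, ih, insertUnique_eq, mem_insRec]
    constructor
    · rintro ((rfl | h) | ⟨z, hz, rfl⟩)
      · exact Or.inr ⟨y, List.mem_cons_self, rfl⟩
      · exact Or.inl h
      · exact Or.inr ⟨z, List.mem_cons_of_mem _ hz, rfl⟩
    · rintro (h | ⟨z, hz, rfl⟩)
      · exact Or.inl (Or.inr h)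
      · rcases List.mem_cons.mp hz with rfl | hz
        · exact Or.inl (Or.inl rfl)
        · exact Or.inr ⟨z, hz, rfl⟩

theorem goB_pairwise : ∀ (rest acc : List Int), acc.Pairwise (· < ·) →
    (goB rest acc).Pairwise (· < ·) := by
  intro rest
  induction rest with
  | nil => intro acc h; simpa [goB]
  | cons x xs ih =>
    intro acc h
    exact ih _ (foldl_ins_pairwise x xs acc h)

theorem mem_goB (a : Int) : ∀ (rest acc : List Int),
    (a ∈ goB rest acc ↔ a ∈ acc ∨ ∃ p ∈ comb2 rest, a = p.1 + p.2) := by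
  intro rest
  induction rest with
  | nil => intro acc; simp [goB, comb2]
  | cons x xs ih =>
    intro acc
    simp only [goB, ih, mem_foldl_ins, comb2, List.mem_append, List.mem_map]
    constructor
    · rintro ((h | ⟨y, hy, rfl⟩) | ⟨p, hp, rfl⟩)
      · exact Or.inl h
      · exact Or.inr ⟨(x, y), Or.inl ⟨y, hy, rfl⟩, rfl⟩
      · exact Or.inr ⟨p, Or.inr hp, rfl⟩
    · rintro (h | ⟨p, (⟨y, hy, rfl⟩ | hp), rfl⟩)
      · exact Or.inl (Or.inl h)
      · exact Or.inl (Or.inr ⟨y, hy, rfl⟩)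
      · exact Or.inr ⟨p, hp, rfl⟩

theorem goB_eq_sorted_set (numbers : List Int) :
    goB numbers [] =
      PySem.List.sorted (PySem.Set.ofList ((comb2 numbers).map (fun p => p.1 + p.2)))
        (fun x => x) false := by
  have hlt : (goB numbers []).Pairwise (· < ·) := goB_pairwise numbers [] (by simp)
  have hnd : (goB numbers []).Nodup := hlt.imp ne_of_lt
  have hmem : ∀ a, a ∈ goB numbers [] ↔
      a ∈ PySem.Set.ofList ((comb2 numbers).map (fun p => p.1 + p.2)) := by
    intro a
    rw [mem_goB, PySem.Set.mem_ofList, List.mem_map]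
    constructor
    · rintro (h | ⟨p, hp, rfl⟩)
      · simp at h
      · exact ⟨p, hp, rfl⟩
    · rintro ⟨p, hp, rfl⟩
      exact Or.inr ⟨p, hp, rfl⟩
  have hperm : (goB numbers []).Perm (PySem.Set.ofList ((comb2 numbers).map (fun p => p.1 + p.2))) :=
    (List.perm_ext_iff_of_nodup hnd (PySem.Set.nodup_ofList _)).mpr hmem
  exact (PySem.List.sorted_eq_of_perm_of_pairwise_lt _ _ _ hperm hlt).symm

-- ===== VERDICT (by name: the statement is the Claim_ definition above) =====
theorem solution_spec : Claim_equal_solution := by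
  intro numbers _
  unfold Spec_solution solution solution_alt
  simp only [PySem.List.foldl_append_singleton_eq_map, List.nil_append]
  rw [goB_eq_sorted_set]
  exact (drain_heapify_eq_sorted _ (PySem.Set.nodup_ofList _)).symm
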